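-- pv_equiv track=rewrite | github.com/introduction-to-python-2026/ps-4-talweller123-glitch | string_utils.py | split_before_each_uppercase
-- ===== SOURCE A (Python) =====
-- def split_before_each_uppercase(formula):
--     if not formula:
--         return []
--     results = []
--     current_element = formula[0]
--     for char in formula[1:]:
--         if char.isupper():
--             results.append(current_element)
--             current_element = char
--         else:
--             current_element += char
--     if current_element:
--         results.append(current_element)
--     return results
-- ===== SOURCE B (Python) =====
-- def split_before_each_uppercase(formula):
--     # index-based one pass: record the last cut position and slice at each uppercase
--     out = []
--     start = 0
--     for i in range(1, len(formula)):
--         if formula[i].isupper():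
--             out.append(formula[start:i])
--             start = i
--     if formula:
--         out.append(formula[start:])
--     return out
-- ===== Notes on version B (the rewrite author's own statement) =====
-- stated objective: alternative
-- what changed: A builds each segment character by character in an accumulator string; B keeps only the index of the last cut and emits each segment as a slice formula[start:i] at every uppercase position, in one index pass.
import Mathlib
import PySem

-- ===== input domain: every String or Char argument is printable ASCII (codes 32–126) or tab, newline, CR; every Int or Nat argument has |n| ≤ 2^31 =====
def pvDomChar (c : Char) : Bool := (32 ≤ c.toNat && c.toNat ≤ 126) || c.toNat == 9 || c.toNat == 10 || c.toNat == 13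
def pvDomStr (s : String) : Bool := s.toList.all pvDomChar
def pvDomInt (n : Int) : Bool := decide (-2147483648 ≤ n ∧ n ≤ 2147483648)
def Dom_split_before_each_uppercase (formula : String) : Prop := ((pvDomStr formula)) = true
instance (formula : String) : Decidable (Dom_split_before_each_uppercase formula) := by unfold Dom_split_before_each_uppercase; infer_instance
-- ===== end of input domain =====

-- B replaces A's char-by-char accumulation with a single index pass that slices at each uppercase cut point (alternative decomposition, same cost).

-- ===== PORT A =====
-- A's loop body: on an uppercase char flush current_element and restart it, else extend it
def pvAstep (st : List (List Char) × List Char) (ch : Char) : List (List Char) × List Char :=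
  if PySem.Chars.isupper ch then (st.1 ++ [st.2], [ch]) else (st.1, st.2 ++ [ch])

def split_before_each_uppercase (formula : String) : List String :=
  match formula.toList with
  | [] => []
  | c :: rest =>
    let st := rest.foldl pvAstep ([], [c])
    (if st.2 ≠ [] then st.1 ++ [st.2] else st.1).map String.ofList

-- ===== PORT B =====
-- B's loop body: on an uppercase position i append the slice formula[start:i] and cut at i
def pvBstep (cs : List Char) (st : List String × Int) (i : Int) : List String × Int :=
  if PySem.Chars.isupper (PySem.List.pyGetD cs i ' ') then
    (st.1 ++ [String.ofList (PySem.List.slice cs (some st.2) (some i))], i)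
  else st

def split_before_each_uppercase_alt (formula : String) : List String :=
  let cs := formula.toList
  let st := (PySem.List.pyRange 1 (cs.length : Int) 1).foldl (pvBstep cs) ([], 0)
  if cs ≠ [] then st.1 ++ [String.ofList (PySem.List.slice cs (some st.2) none)] else st.1

-- ===== PRECONDITION & SPEC =====
def Spec_split_before_each_uppercase (formula : String) (out : List String) : Prop := out = split_before_each_uppercase_alt formula
instance (formula : String) (out : List String) : Decidable (Spec_split_before_each_uppercase formula out) := by unfold Spec_split_before_each_uppercase; infer_instance

-- ===== CLAIM (what is proved, stated in full; the proofs are below) =====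
def Claim_equal_split_before_each_uppercase : Prop := ∀ (formula : String), Dom_split_before_each_uppercase formula → Spec_split_before_each_uppercase formula (split_before_each_uppercase formula)

-- ===== LEMMAS AND PROOFS =====

-- common recursive characterisation: pvSeg cur cs = the final segment list when the
-- segment in progress is cur and the characters cs remain
def pvSeg (cur : List Char) : List Char → List (List Char)
  | [] => [cur]
  | ch :: cs => if PySem.Chars.isupper ch then cur :: pvSeg [ch] cs else pvSeg (cur ++ [ch]) cs

-- A's loop followed by its final conditional append computes pvSeg
theorem pvA_fold (cs : List Char) (res : List (List Char)) (cur : List Char) (hcur : cur ≠ []) :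
    (if (cs.foldl pvAstep (res, cur)).2 ≠ [] then
        (cs.foldl pvAstep (res, cur)).1 ++ [(cs.foldl pvAstep (res, cur)).2]
      else (cs.foldl pvAstep (res, cur)).1) = res ++ pvSeg cur cs := by
  induction cs generalizing res cur with
  | nil => simp [pvSeg, hcur]
  | cons ch cs ih =>
    simp only [List.foldl_cons]
    by_cases h : PySem.Chars.isupper ch = true
    · rw [show pvAstep (res, cur) ch = (res ++ [cur], [ch]) from by simp [pvAstep, h]]
      rw [ih (res ++ [cur]) [ch] (by simp)]
      simp [pvSeg, h]
    · rw [show pvAstep (res, cur) ch = (res, cur ++ [ch]) from by simp [pvAstep, h]]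
      rw [ih res (cur ++ [ch]) (by simp)]
      simp [pvSeg, h]

-- B's loop followed by its final slice computes pvSeg
-- (invariant: start is the last cut point, j the next index to examine)
theorem pvB_fold (cs : List Char) (m : Nat) (j start : Nat) (out : List String)
    (hsj : start < j) (hm : j + m = cs.length) :
    ((PySem.List.pyRange (j : Int) (cs.length : Int) 1).foldl (pvBstep cs) (out, (start : Int))).1
      ++ [String.ofList (PySem.List.slice cs
          (some ((PySem.List.pyRange (j : Int) (cs.length : Int) 1).foldl (pvBstep cs) (out, (start : Int))).2) none)]
    = out ++ (pvSeg ((cs.drop start).take (j - start)) (cs.drop j)).map String.ofList := by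
  induction m generalizing j start out with
  | zero =>
    have hj : j = cs.length := by omega
    rw [PySem.List.pyRange_one_eq_nil (by omega)]
    simp only [List.foldl_nil]
    subst hj
    rw [PySem.List.slice_from_natCast]
    have hfull : (cs.drop start).take (cs.length - start) = cs.drop start := by
      apply List.take_of_length_le; simp
    simp [pvSeg, hfull]
  | succ m ih =>
    have hj : j < cs.length := by omega
    rw [PySem.List.pyRange_one_cons (by exact_mod_cast hj)]
    simp only [List.foldl_cons]
    have hget : PySem.List.pyGetD cs (j : Int) ' ' = cs[j] := by
      rw [PySem.List.pyGetD_natCast]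
      exact List.getD_eq_getElem cs ' ' hj
    have hdropj : cs.drop j = cs[j] :: cs.drop (j + 1) := List.drop_eq_getElem_cons hj
    have h1 : ((j : Int) + 1) = ((j + 1 : Nat) : Int) := by push_cast; ring
    by_cases h : PySem.Chars.isupper cs[j] = true
    · rw [show pvBstep cs (out, (start : Int)) (j : Int)
            = (out ++ [String.ofList (PySem.List.slice cs (some (start : Int)) (some (j : Int)))], (j : Int))
          from by simp [pvBstep, hget, h]]
      rw [h1, ih (j + 1) j _ (by omega) (by omega)]
      rw [PySem.List.slice_natCast]
      have htake1 : (cs.drop j).take (j + 1 - j) = [cs[j]] := by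
        have : j + 1 - j = 1 := by omega
        rw [this, hdropj]
        simp only [List.take_succ_cons, List.take_zero]
      rw [htake1]
      conv_rhs => rw [hdropj]
      simp [pvSeg, h]
    · rw [show pvBstep cs (out, (start : Int)) (j : Int) = (out, (start : Int))
          from by simp [pvBstep, hget, h]]
      rw [h1, ih (j + 1) start out (by omega) (by omega)]
      have htake : (cs.drop start).take (j + 1 - start)
          = (cs.drop start).take (j - start) ++ [cs[j]] := by
        have hlt : j - start < (cs.drop start).length := by simp; omega
        have hsucc : j + 1 - start = (j - start) + 1 := by omega
        rw [hsucc, List.take_add_one, List.getElem?_eq_getElem hlt]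
        simp only [List.getElem_drop, Option.toList_some]
        congr 3
        omega
      rw [htake]
      conv_rhs => rw [hdropj]
      simp only [pvSeg, h, Bool.false_eq_true, if_false]

-- ===== VERDICT (by name: the statement is the Claim_ definition above) =====
theorem split_before_each_uppercase_spec : Claim_equal_split_before_each_uppercase := by
  intro formula _
  show split_before_each_uppercase formula = split_before_each_uppercase_alt formula
  unfold split_before_each_uppercase split_before_each_uppercase_alt
  cases hcs : formula.toList with
  | nil => simp
  | cons c rest =>
    simp only []
    have hB := pvB_fold (c :: rest) rest.length 1 0 [] (by omega) (by simp; omega)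
    rw [Nat.cast_one, Nat.cast_zero] at hB
    simp only [List.nil_append, Nat.sub_zero, List.drop_zero, List.take_succ_cons,
      List.take_zero, List.drop_succ_cons, List.drop_zero] at hB
    rw [pvA_fold rest [] [c] (by simp), if_pos (show (c :: rest : List Char) ≠ [] from by simp)]
    simp only [List.nil_append]
    exact hB.symm
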